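-- pv_equiv track=rewrite | github.com/habibhamdoun/programmable-matter-project | custom_shapes.py | create_triangle_shape
-- ===== SOURCE A (Python) =====
-- def create_triangle_shape(grid_size, center, height=7):
--     """Create a triangle shape"""
--     triangle = []
--     for r in range(center, center + height):
--         width = 2 * (r - center) + 1
--         for c in range(center - width // 2, center + width // 2 + 1):
--             if r == center + height - 1 or c == center - width // 2 or c == center + width // 2:
--                 triangle.append((r, c))
--     return triangle
-- ===== SOURCE B (Python) =====
-- def create_triangle_shape(grid_size, center, height=7):
--     """Create a triangle shape (boundary only): emit the one or two edge
--     cells of each row directly, then the full bottom row."""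
--     triangle = []
--     for k in range(height - 1):
--         if k == 0:
--             triangle.append((center, center))
--         else:
--             triangle.append((center + k, center - k))
--             triangle.append((center + k, center + k))
--     bottom = center + height - 1
--     triangle.extend((bottom, c) for c in range(center - height + 1, center + height))
--     return triangle
-- ===== Notes on version B (the rewrite author's own statement) =====
-- stated objective: faster
-- what changed: Instead of scanning every cell of every row and filtering for boundary cells, B emits the one or two edge cells of each row directly and appends the full bottom row, so no interior cell is ever visited.
import Mathlib
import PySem

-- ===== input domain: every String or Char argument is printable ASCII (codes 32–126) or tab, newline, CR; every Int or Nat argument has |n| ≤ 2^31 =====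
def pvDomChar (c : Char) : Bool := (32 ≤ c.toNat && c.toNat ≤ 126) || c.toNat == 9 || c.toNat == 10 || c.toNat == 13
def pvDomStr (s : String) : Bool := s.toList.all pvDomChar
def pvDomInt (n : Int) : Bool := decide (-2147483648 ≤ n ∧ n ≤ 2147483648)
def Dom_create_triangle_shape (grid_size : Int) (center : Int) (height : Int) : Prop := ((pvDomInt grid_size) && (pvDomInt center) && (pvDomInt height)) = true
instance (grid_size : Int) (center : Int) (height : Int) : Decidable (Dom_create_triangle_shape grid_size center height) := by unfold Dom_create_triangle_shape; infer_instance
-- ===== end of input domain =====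

-- B emits only the one/two edge cells of each row plus the full bottom row
-- (O(height) work) instead of scanning and filtering every interior cell (O(height^2)).

-- ===== PORT A =====
def create_triangle_shape (grid_size : Int) (center : Int) (height : Int) : List (Int × Int) :=
  (PySem.List.pyRange center (center + height)).foldl
    (fun triangle r =>
      let width : Int := 2 * (r - center) + 1
      (PySem.List.pyRange (center - PySem.Int.floordiv width 2)
          (center + PySem.Int.floordiv width 2 + 1)).foldl
        (fun triangle c =>
          if r = center + height - 1 ∨ c = center - PySem.Int.floordiv width 2 ∨
              c = center + PySem.Int.floordiv width 2 then
            triangle ++ [(r, c)]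
          else triangle)
        triangle)
    []

-- ===== PORT B =====
def create_triangle_shape_alt (grid_size : Int) (center : Int) (height : Int) : List (Int × Int) :=
  let triangle := (PySem.List.pyRange 0 (height - 1)).foldl
    (fun triangle k =>
      if k = 0 then triangle ++ [(center, center)]
      else triangle ++ [(center + k, center - k), (center + k, center + k)])
    []
  let bottom := center + height - 1
  triangle ++ (PySem.List.pyRange (center - height + 1) (center + height)).map (fun c => (bottom, c))

-- ===== PRECONDITION & SPEC =====
def Spec_create_triangle_shape (grid_size : Int) (center : Int) (height : Int) (out : List (Int × Int)) : Prop := out = create_triangle_shape_alt grid_size center height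
instance (grid_size : Int) (center : Int) (height : Int) (out : List (Int × Int)) : Decidable (Spec_create_triangle_shape grid_size center height out) := by unfold Spec_create_triangle_shape; infer_instance

-- ===== CLAIM (what is proved, stated in full; the proofs are below) =====
def Claim_equal_create_triangle_shape : Prop := ∀ (grid_size : Int) (center : Int) (height : Int), Dom_create_triangle_shape grid_size center height → Spec_create_triangle_shape grid_size center height (create_triangle_shape grid_size center height)

-- ===== LEMMAS AND PROOFS =====

-- A's row r, after simplifying width // 2 to r - center.
def rowF (center height r : Int) : List (Int × Int) :=
  ((PySem.List.pyRange (center - (r - center)) (center + (r - center) + 1)).filter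
    (fun c => decide (r = center + height - 1 ∨ c = center - (r - center) ∨ c = center + (r - center)))).map
    (fun c => (r, c))

-- B's row for offset k.
def rowG (center k : Int) : List (Int × Int) :=
  if k = 0 then [(center, center)]
  else [(center + k, center - k), (center + k, center + k)]

lemma create_triangle_shape_eq_flatMap (gs center height : Int) :
    create_triangle_shape gs center height
      = (PySem.List.pyRange center (center + height)).flatMap (rowF center height) := by
  unfold create_triangle_shape
  calc (PySem.List.pyRange center (center + height)).foldl _ []
      = (PySem.List.pyRange center (center + height)).foldl
          (fun acc r => acc ++ rowF center height r) [] := by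
        apply PySem.List.foldl_congr_mem
        intro acc r hr
        have hrc : center ≤ r := (PySem.List.mem_pyRange_one.mp hr).1
        have hfd : PySem.Int.floordiv (2 * (r - center) + 1) 2 = r - center := by
          rw [PySem.Int.floordiv_eq_ediv_of_pos (by norm_num)]; omega
        simp only [hfd]
        rw [PySem.List.foldl_append_ite
          (fun c => r = center + height - 1 ∨ c = center - (r - center) ∨ c = center + (r - center))
          (fun c => (r, c))]
        rfl
    _ = _ := by rw [PySem.List.foldl_append_eq_flatMap]; simp

lemma create_triangle_shape_alt_eq_flatMap (gs center height : Int) :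
    create_triangle_shape_alt gs center height
      = (PySem.List.pyRange 0 (height - 1)).flatMap (rowG center)
          ++ (PySem.List.pyRange (center - height + 1) (center + height)).map
              (fun c => (center + height - 1, c)) := by
  simp only [create_triangle_shape_alt]
  congr 1
  calc (PySem.List.pyRange 0 (height - 1)).foldl _ []
      = (PySem.List.pyRange 0 (height - 1)).foldl
          (fun acc k => acc ++ rowG center k) [] := by
        apply PySem.List.foldl_congr_mem
        intro acc k hk
        unfold rowG
        split <;> rfl
    _ = _ := by rw [PySem.List.foldl_append_eq_flatMap]; simp

lemma filter_two_ends (a b : Int) (hab : a < b) :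
    (PySem.List.pyRange a b).filter (fun c => decide (c = a ∨ c = b - 1))
      = if a = b - 1 then [a] else [a, b - 1] := by
  by_cases h : a = b - 1
  · have hb : b = a + 1 := by omega
    subst hb
    rw [PySem.List.pyRange_one_cons hab]
    simp
  · have h2 : a < b - 1 := by omega
    have hb : b = (b - 1) + 1 := by omega
    rw [hb, PySem.List.pyRange_one_succ_right (by omega : a ≤ b - 1),
      PySem.List.pyRange_one_cons h2]
    have hmid : (PySem.List.pyRange (a + 1) (b - 1)).filter
        (fun c => decide (c = a ∨ c = b - 1 + 1 - 1)) = [] := by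
      rw [List.filter_eq_nil_iff]
      intro x hx
      have := PySem.List.mem_pyRange_one.mp hx
      simp only [decide_eq_true_eq]
      omega
    simp only [List.filter_append, List.filter_cons, hmid]
    simp [h]

lemma rowF_not_bottom (center height k : Int) (h0 : 0 ≤ k) (hk : k < height - 1) :
    rowF center height (center + k) = rowG center k := by
  unfold rowF rowG
  have hsub : center + k - center = k := by ring
  rw [hsub]
  rw [List.filter_congr (q := fun c => decide (c = center - k ∨ c = center + k + 1 - 1))
    (fun c _ => by simp only [decide_eq_decide]; omega)]
  rw [filter_two_ends (center - k) (center + k + 1) (by omega)]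
  by_cases hk0 : k = 0
  · subst hk0; simp
  · have h3 : center + k + 1 - 1 = center + k := by ring
    rw [h3, if_neg (show ¬ center - k = center + k by omega)]
    simp [hk0]

lemma rowF_bottom (center height : Int) :
    rowF center height (center + height - 1)
      = (PySem.List.pyRange (center - height + 1) (center + height)).map
          (fun c => (center + height - 1, c)) := by
  unfold rowF
  have h1 : center + height - 1 - center = height - 1 := by ring
  rw [h1]
  have h2 : center - (height - 1) = center - height + 1 := by ring
  have h3 : center + (height - 1) + 1 = center + height := by ring
  rw [h2, h3]
  rw [List.filter_eq_self.mpr]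
  intro c _
  exact decide_eq_true (Or.inl rfl)

lemma ports_agree (gs center height : Int) :
    create_triangle_shape gs center height = create_triangle_shape_alt gs center height := by
  rw [create_triangle_shape_eq_flatMap, create_triangle_shape_alt_eq_flatMap]
  by_cases hh : height ≤ 0
  · have e0 : height.toNat = 0 := by omega
    have e3 : (center + height - (center - height + 1)).toNat = 0 := by omega
    simp [PySem.List.pyRange_one, e0, e3]
  ·
    have hsplit : PySem.List.pyRange center (center + height)
        = PySem.List.pyRange center (center + height - 1) ++ [center + height - 1] := by
      have h := PySem.List.pyRange_one_succ_right
        (a := center) (b := center + height - 1) (by omega)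
      rw [show center + height - 1 + 1 = center + height by ring] at h
      exact h
    rw [hsplit, List.flatMap_append]
    congr 1
    · rw [PySem.List.pyRange_one center (center + height - 1),
        PySem.List.pyRange_one 0 (height - 1)]
      have elen : (center + height - 1 - center).toNat = (height - 1 - 0).toNat := by omega
      rw [elen, List.flatMap_map, List.flatMap_map]
      apply List.flatMap_congr
      intro j hj
      have hjlt : (j : Int) < height - 1 := by
        have := List.mem_range.mp hj
        omega
      have hz : (0 : Int) + (j : Int) = (j : Int) := by ring
      rw [hz]
      exact rowF_not_bottom center height j (by positivity) hjlt
    · simp only [List.flatMap_cons, List.flatMap_nil, List.append_nil]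
      exact rowF_bottom center height

-- ===== VERDICT (by name: the statement is the Claim_ definition above) =====
theorem create_triangle_shape_spec : Claim_equal_create_triangle_shape := by
  intro gs center height _
  exact ports_agree gs center height
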